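-- pv_equiv track=rewrite | github.com/outerspacebear/AdventOfCode2024 | day 6/6-1.py | update_map_grid
-- ===== SOURCE A (Python) =====
-- def update_map_grid(position, new_char, map_grid):
--     new_grid = []
--     for row_i in range(0, len(map_grid)):
--         new_row = []
--         for col_i in range(0, len(map_grid[row_i])):
--             if row_i == position[0] and col_i == position[1]:
--                 new_row.append(new_char)
--             else:
--                 new_row.append(map_grid[row_i][col_i])
--         new_grid.append(new_row)
--     return new_grid
-- ===== SOURCE B (Python) =====
-- def update_map_grid(position, new_char, map_grid):
--     new_grid = [list(row) for row in map_grid]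
--     r, c = position[0], position[1]
--     if 0 <= r < len(new_grid) and 0 <= c < len(new_grid[r]):
--         new_grid[r][c] = new_char
--     return new_grid
-- ===== Notes on version B (the rewrite author's own statement) =====
-- stated objective: simpler
-- what changed: Replaces A's nested per-cell loops with a per-cell position-equality test by a plain deep copy of the rows followed by one bounds-guarded indexed assignment of the target cell.
-- outside the precondition, e.g. on update_map_grid((5,), 'X', [['a']]): A returns [['a']], B raises IndexError; on update_map_grid((0,), 'X', [[]]): A returns [[]], B raises IndexError; on update_map_grid((), 'X', []): A returns [], B raises IndexError
import Mathlib
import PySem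

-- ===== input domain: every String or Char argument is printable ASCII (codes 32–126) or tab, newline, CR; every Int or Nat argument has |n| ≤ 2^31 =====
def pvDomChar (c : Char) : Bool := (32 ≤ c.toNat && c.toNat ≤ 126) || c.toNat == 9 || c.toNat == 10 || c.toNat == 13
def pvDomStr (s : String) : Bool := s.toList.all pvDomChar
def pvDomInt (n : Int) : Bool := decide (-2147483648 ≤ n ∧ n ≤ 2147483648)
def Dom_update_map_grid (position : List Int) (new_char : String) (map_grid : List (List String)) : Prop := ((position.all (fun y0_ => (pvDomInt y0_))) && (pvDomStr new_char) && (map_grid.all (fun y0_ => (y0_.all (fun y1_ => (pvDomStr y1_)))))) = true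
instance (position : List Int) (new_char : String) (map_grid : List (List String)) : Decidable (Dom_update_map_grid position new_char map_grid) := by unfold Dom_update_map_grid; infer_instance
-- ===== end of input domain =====

-- B replaces A's nested loops with a per-cell equality test by a plain row copy plus one
-- bounds-guarded indexed assignment of the target cell (objective: simpler).

-- ===== PORT A =====
def update_map_grid (position : List Int) (new_char : String) (map_grid : List (List String)) : List (List String) :=
  (PySem.List.pyRange 0 (map_grid.length : Int) 1).foldl (fun new_grid row_i =>
    new_grid ++ [ (PySem.List.pyRange 0 ((PySem.List.pyGetD map_grid row_i []).length : Int) 1).foldl (fun new_row col_i =>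
      if row_i = (PySem.List.pyGet? position 0).getD 0 ∧ col_i = (PySem.List.pyGet? position 1).getD 0 then
        new_row ++ [new_char]
      else
        new_row ++ [PySem.List.pyGetD (PySem.List.pyGetD map_grid row_i []) col_i ""]) [] ]) []

-- ===== PORT B =====
def update_map_grid_alt (position : List Int) (new_char : String) (map_grid : List (List String)) : List (List String) :=
  let new_grid := map_grid.map (fun row => row.map id)
  match PySem.List.pyGet? position 0, PySem.List.pyGet? position 1 with
  | some r, some c =>
      if 0 ≤ r ∧ r < (new_grid.length : Int) ∧ 0 ≤ c ∧ c < ((PySem.List.pyGetD new_grid r []).length : Int) then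
        PySem.List.pySetD new_grid r (PySem.List.pySetD (PySem.List.pyGetD new_grid r []) c new_char)
      else new_grid
  | _, _ => new_grid

-- ===== PRECONDITION & SPEC =====
-- Pre_ excludes position lists with fewer than two entries: there A raises IndexError as soon as
-- it compares against a missing coordinate, and in the cases where the missing coordinate is never
-- reached (empty grid, empty rows, or a never-matched row index) A's unchanged copy is an accident
-- of loop order that B's two unconditional coordinate reads cannot reproduce (B raises IndexError).
def Pre_update_map_grid (position : List Int) (new_char : String) (map_grid : List (List String)) : Prop :=
  2 ≤ position.length
instance (position : List Int) (new_char : String) (map_grid : List (List String)) : Decidable (Pre_update_map_grid position new_char map_grid) := by unfold Pre_update_map_grid; infer_instance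

def pvWitness_update_map_grid : List Int × String × List (List String) :=
  ([0, 1], "X", [["a", "b"], ["c", "d"]])

def Spec_update_map_grid (position : List Int) (new_char : String) (map_grid : List (List String)) (out : List (List String)) : Prop := out = update_map_grid_alt position new_char map_grid
instance (position : List Int) (new_char : String) (map_grid : List (List String)) (out : List (List String)) : Decidable (Spec_update_map_grid position new_char map_grid out) := by unfold Spec_update_map_grid; infer_instance

-- ===== CLAIM (what is proved, stated in full; the proofs are below) =====
def Claim_equal_update_map_grid : Prop := ∀ (position : List Int) (new_char : String) (map_grid : List (List String)), Dom_update_map_grid position new_char map_grid → Pre_update_map_grid position new_char map_grid → Spec_update_map_grid position new_char map_grid (update_map_grid position new_char map_grid)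

-- ===== LEMMAS AND PROOFS =====

-- A's inner loop: a fold appending one cell per step, chosen by the position test.
theorem inner_fold (p0 p1 x : Int) (nc : String) (row : List String) :
    ∀ (l : List Int) (acc : List String),
      l.foldl (fun new_row col_i =>
          if x = p0 ∧ col_i = p1 then new_row ++ [nc]
          else new_row ++ [PySem.List.pyGetD row col_i ""]) acc
        = acc ++ l.map (fun col_i =>
            if x = p0 ∧ col_i = p1 then nc else PySem.List.pyGetD row col_i "") := by
  intro l
  induction l with
  | nil => intro acc; simp
  | cons y ys ih =>
    intro acc
    simp only [List.foldl_cons, List.map_cons]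
    by_cases hy : x = p0 ∧ y = p1
    · rw [if_pos hy, if_pos hy, ih]
      simp
    · rw [if_neg hy, if_neg hy, ih]
      simp

theorem update_map_grid_eq (position : List Int) (new_char : String)
    (map_grid : List (List String)) (h : 2 ≤ position.length) :
    update_map_grid position new_char map_grid
      = update_map_grid_alt position new_char map_grid := by
  rcases position with _ | ⟨p0, _ | ⟨p1, rest⟩⟩
  · simp at h
  · simp at h
  · clear h
    have h0 : PySem.List.pyGet? (p0 :: p1 :: rest) 0 = some p0 :=
      PySem.List.pyGet?_zero_cons _ _
    have h1 : PySem.List.pyGet? (p0 :: p1 :: rest) 1 = some p1 := by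
      simpa using PySem.List.pyGet?_ofNat (p0 :: p1 :: rest) 1 (by simp)
    unfold update_map_grid update_map_grid_alt
    rw [h0, h1]
    simp only [Option.getD_some, List.map_id, List.map_id']
    simp only [PySem.List.foldl_append_singleton_eq_map, List.nil_append]
    simp only [PySem.List.pyRange_zero_natCast, List.map_map, Function.comp_def]
    split_ifs with hg
    · obtain ⟨hp0, hp0n, hp1, hp1m⟩ := hg
      rw [PySem.List.pyGetD_eq_getElem map_grid [] hp0 hp0n] at hp1m ⊢
      rw [PySem.List.pySetD_of_nonneg _ _ hp0, PySem.List.pySetD_of_nonneg _ _ hp1]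
      apply List.ext_getElem
      · simp
      · intro i hi1 hi2
        simp only [List.getElem_map, List.getElem_range, List.getElem_set,
          PySem.List.pyGetD_natCast]
        have hi : i < map_grid.length := by simpa using hi1
        have hrow : map_grid.getD i [] = map_grid[i] := List.getD_eq_getElem _ _ hi
        rw [hrow, inner_fold, List.nil_append]
        by_cases hip : (i : Int) = p0
        · have hpi : p0.toNat = i := by omega
          rw [if_pos hpi]
          have hgi : map_grid[p0.toNat] = map_grid[i] := by congr 1
          rw [hgi]
          apply List.ext_getElem
          · simp
          · intro j hj1 hj2
            have hj : j < map_grid[i].length := by simpa using hj1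
            simp only [List.getElem_map, List.getElem_range, List.getElem_set,
              PySem.List.pyGetD_natCast]
            by_cases hjp : (j : Int) = p1
            · rw [if_pos (show (i : Int) = p0 ∧ ((j : Nat) : Int) = p1 from ⟨hip, hjp⟩),
                if_pos (by omega : p1.toNat = j)]
            · rw [if_neg (show ¬((i : Int) = p0 ∧ ((j : Nat) : Int) = p1) from
                  fun hh => hjp hh.2),
                if_neg (by omega : ¬ p1.toNat = j)]
              exact List.getD_eq_getElem _ _ hj
        · rw [if_neg (by omega : ¬ p0.toNat = i)]
          apply List.ext_getElem
          · simp
          · intro j hj1 hj2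
            have hj : j < map_grid[i].length := by simpa using hj1
            simp only [List.getElem_map, List.getElem_range, PySem.List.pyGetD_natCast]
            rw [if_neg (show ¬((i : Int) = p0 ∧ ((j : Nat) : Int) = p1) from
                fun hh => hip hh.1)]
            exact List.getD_eq_getElem _ _ hj
    · apply List.ext_getElem
      · simp
      · intro i hi1 hi2
        simp only [List.getElem_map, List.getElem_range, PySem.List.pyGetD_natCast]
        have hi : i < map_grid.length := by simpa using hi1
        have hrow : map_grid.getD i [] = map_grid[i] := List.getD_eq_getElem _ _ hi
        rw [hrow, inner_fold, List.nil_append]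
        apply List.ext_getElem
        · simp
        · intro j hj1 hj2
          have hj : j < map_grid[i].length := by simpa using hj1
          simp only [List.getElem_map, List.getElem_range, PySem.List.pyGetD_natCast]
          have hcond : ¬ ((i : Int) = p0 ∧ ((j : Nat) : Int) = p1) := by
            rintro ⟨hi2', hj2'⟩
            apply hg
            refine ⟨by omega, by omega, by omega, ?_⟩
            rw [← hi2', PySem.List.pyGetD_natCast, hrow]
            omega
          rw [if_neg hcond]
          exact List.getD_eq_getElem _ _ hj

-- ===== VERDICT (by name: the statement is the Claim_ definition above) =====
theorem update_map_grid_spec : Claim_equal_update_map_grid := by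
  intro position new_char map_grid _ hpre
  unfold Spec_update_map_grid
  exact update_map_grid_eq position new_char map_grid hpre
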